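-- pv_equiv track=rewrite | github.com/Will-Robin/DataBinder | DataBinder/Algorithms/GraphEnvironments.py | prime_ranking
-- ===== SOURCE A (Python) =====
-- def is_prime(number, primes_list):
--     """
--     Test if a number is prime.
--     Parameters
--     ----------
--     number: int
--
--     Returns
--     -------
--     bool
--     """
--
--     for prime in primes_list:
--         if not (number == prime or number % prime):
--             return False
--
--     primes_list.add(number)
--     return number
--
-- def generate_primes(num):
--     """
--     Generate the first `num` prime numbers.
--
--     From this stack overflow answer:
--     https://stackoverflow.com/questions/1628949/to-find-first-n-prime-numbers-in-python
--
--     Parameters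
--     ----------
--     num: int
--
--     Returns
--     -------
--     primes: list[int]
--     """
--
--     primes = set([2])
--     i, p = 2, 0
--     while True:
--         if is_prime(i, primes):
--             p += 1
--             if p == num:
--                 return list(primes)
--         i += 1
--
-- def prime_ranking(ranking):
--     """
--     Map a ranking to prime numbers.
--
--     Parameters
--     ----------
--     ranking: list[int]
--
--     Returns
--     -------
--     prime_ranking: list[int]
--     """
--
--     unique_ranks = []
--
--     for r in ranking:
--         if r not in unique_ranks:
--             unique_ranks.append(r)
--
--     num = len(unique_ranks)
--
--     prime_numbers = generate_primes(num)
--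
--     indices = [sorted(unique_ranks).index(l) for l in ranking]
--
--     prime_ranking = [prime_numbers[i] for i in indices]
--
--     return prime_ranking
-- ===== SOURCE B (Python) =====
-- def _first_primes(n):
--     """First n primes via a doubling sieve of Eratosthenes."""
--     limit = 32
--     while True:
--         sieve = [True] * (limit + 1)
--         sieve[0] = sieve[1] = False
--         for q in range(2, limit + 1):
--             if sieve[q]:
--                 for m in range(q * q, limit + 1, q):
--                     sieve[m] = False
--         primes = [x for x in range(limit + 1) if sieve[x]]
--         if len(primes) >= n:
--             return primes[:n]
--         limit *= 2
--
--
-- def prime_ranking(ranking):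
--     uniq = sorted(set(ranking))
--     primes = _first_primes(len(uniq))
--     to_prime = dict(zip(uniq, primes))
--     return [to_prime[r] for r in ranking]
-- ===== Notes on version B (the rewrite author's own statement) =====
-- stated objective: alternative
-- what changed: Replaces the per-element sorted(unique).index rescan and the trial-division-with-mutating-set prime generator by a one-shot sorted(set(...)), a doubling sieve of Eratosthenes, and a value-to-prime dict built once.
-- outside the precondition, e.g. on prime_ranking([]): A does not finish within the time limit, B returns []
import Mathlib
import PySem

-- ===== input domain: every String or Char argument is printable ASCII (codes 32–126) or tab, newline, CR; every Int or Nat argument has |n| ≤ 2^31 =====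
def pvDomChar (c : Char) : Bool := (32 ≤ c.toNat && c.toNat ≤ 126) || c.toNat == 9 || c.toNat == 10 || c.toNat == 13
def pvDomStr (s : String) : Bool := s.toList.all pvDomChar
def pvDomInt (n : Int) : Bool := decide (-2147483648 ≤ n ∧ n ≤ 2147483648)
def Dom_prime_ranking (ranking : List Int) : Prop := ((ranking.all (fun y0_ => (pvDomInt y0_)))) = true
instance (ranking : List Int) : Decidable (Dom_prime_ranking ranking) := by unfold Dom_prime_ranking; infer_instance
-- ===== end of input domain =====

-- B replaces A's per-element sorted(unique).index rescans and trial-division prime generator by one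
-- sorted(set(...)), a doubling sieve of Eratosthenes, and a value→prime dict built once (different algorithm; speed not measured inside Pre_).

-- ===== PORT A =====
-- is_prime: scan the primes seen so far; the scanned set's iteration order cannot affect the Boolean
-- result (it only picks WHICH divisor triggers the early return), so scanning in insertion order is exact.
def pvIsPrimeLoop (number : Int) : List Int → Bool
  | [] => true
  | p :: rest =>
    if !(number == p || PySem.Int.mod number p != 0) then false
    else pvIsPrimeLoop number rest

-- is_prime returns `number` (≥ 2, truthy) after adding it, or False; modelled as Bool × updated set
def pvIsPrime (number : Int) (primes_list : PySem.Set Int) : Bool × PySem.Set Int :=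
  if pvIsPrimeLoop number primes_list then (true, PySem.Set.add primes_list number)
  else (false, primes_list)

-- generate_primes' `while True` loop, transliterated with fuel (a totality guard only: under
-- Pre_ at most 11 primes are requested, reached with i ≤ 31, well inside 40 iterations);
-- list(primes) is read in insertion order, which under Pre_ (≤ 11 primes) is CPython's order too
def pvGenLoop : Nat → PySem.Set Int → Int → Int → Int → List Int
  | 0, primes, _, _, _ => primes
  | Nat.succ fuel, primes, i, p, num =>
    let r := pvIsPrime i primes
    if r.1 then
      if p + 1 == num then r.2
      else pvGenLoop fuel r.2 (i + 1) (p + 1) num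
    else pvGenLoop fuel r.2 (i + 1) p num

def pvGeneratePrimes (num : Int) : List Int :=
  pvGenLoop 40 (PySem.Set.ofList [2]) 2 0 num

def prime_ranking (ranking : List Int) : List Int :=
  let unique_ranks := ranking.foldl (fun acc r => if acc.contains r then acc else acc ++ [r]) []
  let num : Int := unique_ranks.length
  let prime_numbers := pvGeneratePrimes num
  let indices := ranking.map (fun l =>
    (((PySem.List.index? (PySem.List.sorted unique_ranks (fun x => x)) l).getD 0 : Nat) : Int))
  indices.map (fun i => PySem.List.pyGetD prime_numbers i 0)

-- ===== PORT B =====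
-- one round of Source B's doubling sieve, with fuel for the (never reached under Pre_) doubling retries
def pvFirstPrimesLoop (n : Nat) : Nat → Nat → List Int
  | 0, _ => []
  | Nat.succ fuel, limit =>
    let sieve0 := ((List.replicate (limit + 1) true).set 0 false).set 1 false
    let sieve := (PySem.List.pyRange 2 ((limit : Int) + 1) 1).foldl (fun sv q =>
      if PySem.List.pyGetD sv q false then
        (PySem.List.pyRange (q * q) ((limit : Int) + 1) q).foldl
          (fun sv' m => PySem.List.pySetD sv' m false) sv
      else sv) sieve0
    let primes := (PySem.List.pyRange 0 ((limit : Int) + 1) 1).filter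
      (fun x => PySem.List.pyGetD sieve x false)
    if n ≤ primes.length then primes.take n
    else pvFirstPrimesLoop n fuel (limit * 2)

def pvFirstPrimes (n : Nat) : List Int := pvFirstPrimesLoop n 40 32

def prime_ranking_alt (ranking : List Int) : List Int :=
  let uniq := PySem.List.sorted (PySem.Set.ofList ranking) (fun x => x)
  let primes := pvFirstPrimes uniq.length
  let to_prime := PySem.Dict.ofList (uniq.zip primes)
  ranking.map (fun r => (to_prime.get? r).getD 0)

-- ===== PRECONDITION & SPEC =====
-- Pre_ excludes the empty list, on which A's generate_primes(0) loops forever, and lists with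
-- 12 or more distinct values, on which A's list(primes) order is an accident of CPython's set
-- (hash-table) iteration order — unsorted from the 12th prime (37) on — not a specifiable value.
def Pre_prime_ranking (ranking : List Int) : Prop :=
  ranking ≠ [] ∧ (PySem.List.dedup ranking).length ≤ 11
instance (ranking : List Int) : Decidable (Pre_prime_ranking ranking) := by
  unfold Pre_prime_ranking; infer_instance

def pvWitness_prime_ranking : List Int := [3, 1, 3, -2]

def Spec_prime_ranking (ranking : List Int) (out : List Int) : Prop := out = prime_ranking_alt ranking
instance (ranking : List Int) (out : List Int) : Decidable (Spec_prime_ranking ranking out) := by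
  unfold Spec_prime_ranking; infer_instance

-- ===== CLAIM (what is proved, stated in full; the proofs are below) =====
def Claim_equal_prime_ranking : Prop := ∀ (ranking : List Int), Dom_prime_ranking ranking → Pre_prime_ranking ranking → Spec_prime_ranking ranking (prime_ranking ranking)

-- ===== LEMMAS AND PROOFS =====

-- A's manual first-occurrence dedup loop is Python's set(...) insertion order
theorem pv_foldl_dedup (ranking : List Int) :
    ranking.foldl (fun acc r => if acc.contains r then acc else acc ++ [r]) [] =
      PySem.List.dedup ranking := rfl

-- the two prime generators agree on every count Pre_ admits
set_option maxRecDepth 100000 in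
theorem pv_gen_eq_sieve : ∀ n : Nat, n < 12 → 1 ≤ n →
    pvGeneratePrimes (n : Int) = pvFirstPrimes n := by
  decide

set_option maxRecDepth 100000 in
theorem pv_firstPrimes_length : ∀ n : Nat, n < 12 → (pvFirstPrimes n).length = n := by
  decide

theorem pv_elem_eq (su ps : List Int) (hnd : su.Nodup) (hlen : ps.length = su.length)
    (r : Int) (hr : r ∈ su) :
    PySem.List.pyGetD ps (((PySem.List.index? su r).getD 0 : Nat) : Int) 0 =
      ((PySem.Dict.ofList (su.zip ps)).get? r).getD 0 := by
  obtain ⟨k, hk⟩ : ∃ k, PySem.List.index? su r = some k :=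
    Option.isSome_iff_exists.mp ((PySem.List.index?_isSome_iff su r).mpr hr)
  obtain ⟨hklt, hsk, -⟩ := PySem.List.getElem_of_index?_eq_some hk
  have hkps : k < ps.length := by omega
  have hfst : (su.zip ps).map Prod.fst = su := List.map_fst_zip (by omega)
  have hitems : (PySem.Dict.ofList (su.zip ps)).items = su.zip ps := by
    have h := PySem.Dict.items_foldl_insert_fresh (su.zip ps) Prod.fst Prod.snd PySem.Dict.empty
      (fun a _ => PySem.Dict.contains_empty _) (by rw [hfst]; exact hnd)
    simpa using h
  have hkz : k < (su.zip ps).length := by simp [List.length_zip]; omega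
  have hmem : (r, ps[k]) ∈ su.zip ps := by
    have := List.getElem_mem hkz
    rwa [List.getElem_zip, hsk] at this
  have hg : (PySem.Dict.ofList (su.zip ps)).getD r 0 = ps[k] :=
    PySem.Dict.getD_of_mem_items _ (by rw [hitems]; exact hmem)
      (PySem.Dict.nodup_keys_ofList _) 0
  rw [hk]
  simp only [Option.getD_some]
  rw [PySem.List.pyGetD_ofNat ps k 0 hkps, ← PySem.Dict.getD_eq_get?_getD, hg]

theorem prime_ranking_spec : Claim_equal_prime_ranking := by
  intro ranking _ hpre
  obtain ⟨hne, hle⟩ := hpre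
  unfold Spec_prime_ranking prime_ranking prime_ranking_alt
  simp only [pv_foldl_dedup, PySem.List.dedup_eq_ofList, List.map_map]
  have hn1 : 1 ≤ (PySem.Set.ofList ranking).length := by
    have hm : ranking.head hne ∈ PySem.Set.ofList ranking :=
      (PySem.Set.mem_ofList _ _).mpr (List.head_mem hne)
    exact List.length_pos_iff.mpr (List.ne_nil_of_mem hm)
  have hn11 : (PySem.Set.ofList ranking).length ≤ 11 := by
    simpa [PySem.List.dedup_eq_ofList] using hle
  have hsulen : (PySem.List.sorted (PySem.Set.ofList ranking) (fun x => x)).length =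
      (PySem.Set.ofList ranking).length := PySem.List.length_sorted _ _ _
  rw [hsulen, pv_gen_eq_sieve _ (by omega) hn1]
  apply List.map_congr_left
  intro r hrr
  have hrsu : r ∈ PySem.List.sorted (PySem.Set.ofList ranking) (fun x => x) :=
    (PySem.List.mem_sorted _ _ _ _).mpr ((PySem.Set.mem_ofList _ _).mpr hrr)
  have hnd : (PySem.List.sorted (PySem.Set.ofList ranking) (fun x => x)).Nodup :=
    (PySem.List.sorted_ofList_pairwise_lt ranking).imp (fun h => ne_of_lt h)
  exact pv_elem_eq _ _ hnd
    (by rw [pv_firstPrimes_length _ (by omega), hsulen]) r hrsu
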